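-- pv_equiv track=rewrite | github.com/i1oveMyse1f/sandpile-extremes-classic | results/io2arr.py | fnd_pair_of_ind_in_ordered_arr
-- ===== SOURCE A (Python) =====
-- def fnd_pair_of_ind_in_ordered_arr(arr, val):
--     i = len(arr)-1
--     ind = []
--     for jj in range(2):
--         j = 1 - jj
--         while i > 0 and arr[i] <= val[j]:
--             i -= 1
--         ind.append(i)
--         ind.reverse()
--     return ind
-- ===== SOURCE B (Python) =====
-- def fnd_pair_of_ind_in_ordered_arr(arr, val):
--     v0, v1 = val[0], val[1]
--     g = i1 = i0 = 0
--     for i in range(1, len(arr)):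
--         if arr[i] > v0:
--             g = i
--         if arr[i] > v1:
--             i1 = i
--             i0 = g
--     return [i0, i1]
-- ===== Notes on version B (the rewrite author's own statement) =====
-- stated objective: alternative
-- what changed: Replaces A's two sequential backward early-exit while-scans (the second resuming where the first stopped) with a single forward pass that maintains three running last-match indices.
-- intended difference: On empty arr, A returns [-1,-1] (the leftover loop-start index len(arr)-1, not a valid index), while B returns the 0-clamped boundary pair [0,0], the intended clamped value. — e.g. on fnd_pair_of_ind_in_ordered_arr([], [0, 0]): A returns [-1, -1], B returns [0, 0]
-- outside the precondition, e.g. on fnd_pair_of_ind_in_ordered_arr([5], []): A returns [0, 0], B raises IndexError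
import Mathlib
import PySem

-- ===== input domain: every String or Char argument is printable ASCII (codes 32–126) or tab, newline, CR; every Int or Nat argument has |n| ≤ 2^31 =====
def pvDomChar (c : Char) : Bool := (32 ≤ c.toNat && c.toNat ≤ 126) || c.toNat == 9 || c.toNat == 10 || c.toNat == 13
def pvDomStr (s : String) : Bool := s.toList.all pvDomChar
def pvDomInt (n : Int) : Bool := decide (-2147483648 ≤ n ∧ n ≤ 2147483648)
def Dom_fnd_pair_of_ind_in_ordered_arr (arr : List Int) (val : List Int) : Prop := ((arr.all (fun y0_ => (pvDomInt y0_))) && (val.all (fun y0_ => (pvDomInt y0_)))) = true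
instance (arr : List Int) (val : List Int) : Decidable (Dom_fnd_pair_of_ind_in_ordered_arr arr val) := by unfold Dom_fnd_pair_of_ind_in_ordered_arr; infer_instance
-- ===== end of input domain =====

-- B replaces A's two sequential backward early-exit scans with a single forward pass that keeps
-- three running last-match indices (alternative decomposition, same O(n) cost).


-- ===== PORT A =====
-- the 'while i > 0 and arr[i] <= val[j]: i -= 1' loop (arr[i] is in range whenever read)
def pvScanA (arr : List Int) (v : Int) (i : Int) : Int :=
  if h : 0 < i ∧ (PySem.List.pyGet? arr i).getD 0 ≤ v then pvScanA arr v (i - 1) else i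
termination_by i.toNat
decreasing_by omega

def fnd_pair_of_ind_in_ordered_arr (arr : List Int) (val : List Int) : List Int :=
  let i := (arr.length : Int) - 1
  -- jj = 0, j = 1
  let i1 := pvScanA arr ((PySem.List.pyGet? val 1).getD 0) i
  let ind := List.reverse [i1]
  -- jj = 1, j = 0
  let i2 := pvScanA arr ((PySem.List.pyGet? val 0).getD 0) i1
  (ind ++ [i2]).reverse

-- ===== PORT B =====
-- one forward pass over range(1, len(arr)) carrying (g, i1, i0)
def fnd_pair_of_ind_in_ordered_arr_alt (arr : List Int) (val : List Int) : List Int :=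
  let v0 := (PySem.List.pyGet? val 0).getD 0
  let v1 := (PySem.List.pyGet? val 1).getD 0
  let s := (PySem.List.pyRange 1 arr.length).foldl
    (fun (s : Int × Int × Int) (i : Int) =>
      let g := if v0 < (PySem.List.pyGet? arr i).getD 0 then i else s.1
      let i1 := if v1 < (PySem.List.pyGet? arr i).getD 0 then i else s.2.1
      let i0 := if v1 < (PySem.List.pyGet? arr i).getD 0 then g else s.2.2
      (g, i1, i0)) (0, 0, 0)
  [s.2.2, s.2.1]

-- ===== PRECONDITION & SPEC =====
-- Pre_ only requires val to have at least 2 elements: for len(arr) ≥ 2 Python A raises IndexError on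
-- shorter val (and only returns without reading val for len(arr) ≤ 1), while B always reads val[0]
-- and val[1] and itself raises there.
def Pre_fnd_pair_of_ind_in_ordered_arr (arr : List Int) (val : List Int) : Prop :=
  2 ≤ val.length
instance (arr : List Int) (val : List Int) : Decidable (Pre_fnd_pair_of_ind_in_ordered_arr arr val) := by
  unfold Pre_fnd_pair_of_ind_in_ordered_arr; infer_instance

def pvWitness_fnd_pair_of_ind_in_ordered_arr : List Int × List Int := ([3, 1], [0, 2])

-- On empty arr, A returns [-1,-1] (the leftover loop-start index len(arr)-1, not a valid index),
-- while B returns the 0-clamped boundary pair [0,0], the intended clamped value.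
def D_fnd_pair_of_ind_in_ordered_arr (arr : List Int) (val : List Int) : Prop := arr = []
instance (arr : List Int) (val : List Int) : Decidable (D_fnd_pair_of_ind_in_ordered_arr arr val) := by
  unfold D_fnd_pair_of_ind_in_ordered_arr; infer_instance

def Spec_fnd_pair_of_ind_in_ordered_arr (arr : List Int) (val : List Int) (out : List Int) : Prop :=
  ¬ D_fnd_pair_of_ind_in_ordered_arr arr val → out = fnd_pair_of_ind_in_ordered_arr_alt arr val
instance (arr : List Int) (val : List Int) (out : List Int) : Decidable (Spec_fnd_pair_of_ind_in_ordered_arr arr val out) := by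
  unfold Spec_fnd_pair_of_ind_in_ordered_arr; infer_instance

def pvDiffWitness_fnd_pair_of_ind_in_ordered_arr : List Int × List Int := ([], [0, 0])
def pvDiffWitnessOut_fnd_pair_of_ind_in_ordered_arr : (List Int) × (List Int) := ([-1, -1], [0, 0])

-- ===== CLAIM (what is proved, stated in full; the proofs are below) =====
def Claim_unchanged_fnd_pair_of_ind_in_ordered_arr : Prop := ∀ (arr : List Int) (val : List Int), Dom_fnd_pair_of_ind_in_ordered_arr arr val → Pre_fnd_pair_of_ind_in_ordered_arr arr val → Spec_fnd_pair_of_ind_in_ordered_arr arr val (fnd_pair_of_ind_in_ordered_arr arr val)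
def Claim_changed_fnd_pair_of_ind_in_ordered_arr : Prop := Dom_fnd_pair_of_ind_in_ordered_arr (pvDiffWitness_fnd_pair_of_ind_in_ordered_arr.1) (pvDiffWitness_fnd_pair_of_ind_in_ordered_arr.2) ∧ Pre_fnd_pair_of_ind_in_ordered_arr (pvDiffWitness_fnd_pair_of_ind_in_ordered_arr.1) (pvDiffWitness_fnd_pair_of_ind_in_ordered_arr.2) ∧ D_fnd_pair_of_ind_in_ordered_arr (pvDiffWitness_fnd_pair_of_ind_in_ordered_arr.1) (pvDiffWitness_fnd_pair_of_ind_in_ordered_arr.2) ∧ fnd_pair_of_ind_in_ordered_arr (pvDiffWitness_fnd_pair_of_ind_in_ordered_arr.1) (pvDiffWitness_fnd_pair_of_ind_in_ordered_arr.2) = pvDiffWitnessOut_fnd_pair_of_ind_in_ordered_arr.1 ∧ fnd_pair_of_ind_in_ordered_arr_alt (pvDiffWitness_fnd_pair_of_ind_in_ordered_arr.1) (pvDiffWitness_fnd_pair_of_ind_in_ordered_arr.2) = pvDiffWitnessOut_fnd_pair_of_ind_in_ordered_arr.2 ∧ pvDiffWitnessOut_fnd_pair_of_ind_in_ordered_arr.1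 ≠ pvDiffWitnessOut_fnd_pair_of_ind_in_ordered_arr.2
def Claim_exact_fnd_pair_of_ind_in_ordered_arr : Prop := ∀ (arr : List Int) (val : List Int), Dom_fnd_pair_of_ind_in_ordered_arr arr val → Pre_fnd_pair_of_ind_in_ordered_arr arr val → D_fnd_pair_of_ind_in_ordered_arr arr val → fnd_pair_of_ind_in_ordered_arr arr val ≠ fnd_pair_of_ind_in_ordered_arr_alt arr val

-- ===== LEMMAS AND PROOFS =====

-- the A-loop stops immediately when its guard fails
theorem pv_scanA_stop (arr : List Int) (v i : Int) (h : i ≤ 0) : pvScanA arr v i = i := by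
  rw [pvScanA, dif_neg (by omega)]

theorem pv_fndA_nil (val : List Int) : fnd_pair_of_ind_in_ordered_arr [] val = [-1, -1] := by
  unfold fnd_pair_of_ind_in_ordered_arr
  simp only [List.length_nil, Nat.cast_zero]
  rw [pv_scanA_stop ([] : List Int) ((PySem.List.pyGet? val 1).getD 0) (0 - 1) (by omega)]
  rw [pv_scanA_stop ([] : List Int) ((PySem.List.pyGet? val 0).getD 0) (0 - 1) (by omega)]
  decide

theorem pv_fndB_nil (val : List Int) : fnd_pair_of_ind_in_ordered_arr_alt [] val = [0, 0] := by
  unfold fnd_pair_of_ind_in_ordered_arr_alt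
  simp [PySem.List.pyRange]

-- last index k in [1, t] with v < arr[k] (0 if there is none): the value A's backward scan finds
def pvLastGt (arr : List Int) (v : Int) : Nat → Int
  | 0 => 0
  | (t+1) => if v < arr.getD (t+1) 0 then ((t+1 : Nat) : Int) else pvLastGt arr v t

theorem pv_lastGt_nonneg (arr : List Int) (v : Int) (t : Nat) : 0 ≤ pvLastGt arr v t := by
  induction t with
  | zero => simp [pvLastGt]
  | succ t ih =>
    rw [pvLastGt]
    split
    · omega
    · exact ih

theorem pv_lastGt_le (arr : List Int) (v : Int) (t : Nat) : pvLastGt arr v t ≤ (t : Int) := by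
  induction t with
  | zero => simp [pvLastGt]
  | succ t ih =>
    rw [pvLastGt]
    split
    · omega
    · push_cast
      omega

-- bridge: a Python arr[i] read at a nonnegative in-range Nat index
theorem pv_get_bridge (arr : List Int) (t : Nat) :
    (PySem.List.pyGet? arr ((t : Nat) : Int)).getD 0 = arr.getD t 0 := by
  simp [PySem.List.pyGet?_natCast, List.getD_eq_getElem?_getD]

-- A's backward scan from index j computes pvLastGt at j
theorem pv_scanA_eq_lastGt (arr : List Int) (v : Int) (j : Nat) (hj : j < arr.length) :
    pvScanA arr v ((j : Nat) : Int) = pvLastGt arr v j := by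
  induction j with
  | zero => simpa using pv_scanA_stop arr v 0 (by omega)
  | succ j ih =>
    rw [pvScanA]
    by_cases hc : v < arr.getD (j+1) 0
    · rw [dif_neg]
      · rw [pvLastGt, if_pos hc]
      · rw [not_and]
        intro _
        rw [pv_get_bridge]
        omega
    · rw [dif_pos]
      · have hcast : (((j+1 : Nat) : Int)) - 1 = ((j : Nat) : Int) := by push_cast; ring
        rw [hcast, ih (by omega), pvLastGt, if_neg hc]
      · constructor
        · push_cast
          omega
        · rw [pv_get_bridge]
          omega

-- B's fold invariant: after processing range(1, t+1) the state is
-- (last index > v0, last index > v1, last index > v0 among [1, last index > v1])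
theorem pv_fold_invariant (arr : List Int) (v0 v1 : Int) (t : Nat) (ht : t < arr.length) :
    (PySem.List.pyRange 1 ((t+1 : Nat) : Int)).foldl
      (fun (s : Int × Int × Int) (i : Int) =>
        let g := if v0 < (PySem.List.pyGet? arr i).getD 0 then i else s.1
        let i1 := if v1 < (PySem.List.pyGet? arr i).getD 0 then i else s.2.1
        let i0 := if v1 < (PySem.List.pyGet? arr i).getD 0 then g else s.2.2
        (g, i1, i0)) (0, 0, 0)
    = (pvLastGt arr v0 t, pvLastGt arr v1 t,
       pvLastGt arr v0 (pvLastGt arr v1 t).toNat) := by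
  induction t with
  | zero =>
    have h11 : PySem.List.pyRange 1 ((1 : Nat) : Int) = [] := by decide
    rw [h11]
    simp [pvLastGt]
  | succ t ih =>
    have hsplit : PySem.List.pyRange 1 (((t+1)+1 : Nat) : Int)
        = PySem.List.pyRange 1 ((t+1 : Nat) : Int) ++ [((t+1 : Nat) : Int)] := by
      have := PySem.List.pyRange_one_succ_right (a := 1) (b := ((t+1 : Nat) : Int)) (by push_cast; omega)
      push_cast at this ⊢
      rw [show ((t : Int) + 1 + 1) = ((t : Int) + 1) + 1 by ring]
      exact this
    rw [hsplit, List.foldl_append, ih (by omega)]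
    simp only [List.foldl_cons, List.foldl_nil]
    rw [pv_get_bridge]
    have htn : (((t : Int)) + 1).toNat = t + 1 := by omega
    by_cases h1 : v1 < arr[(t+1)]?.getD 0
    · by_cases h0 : v0 < arr[(t+1)]?.getD 0
      · simp [pvLastGt, List.getD_eq_getElem?_getD, h0, h1, htn]
      · simp [pvLastGt, List.getD_eq_getElem?_getD, h0, h1, htn]
    · by_cases h0 : v0 < arr[(t+1)]?.getD 0
      · simp [pvLastGt, List.getD_eq_getElem?_getD, h0, h1]
      · simp [pvLastGt, List.getD_eq_getElem?_getD, h0, h1]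

-- ===== VERDICT (by name: the statement is the Claim_ definition above) =====
theorem fnd_pair_of_ind_in_ordered_arr_spec : Claim_unchanged_fnd_pair_of_ind_in_ordered_arr := by
  intro arr val _hdom _hpre hnd
  unfold D_fnd_pair_of_ind_in_ordered_arr at hnd
  have hn : 1 ≤ arr.length := by
    cases arr with
    | nil => exact absurd rfl hnd
    | cons a tl => simp
  unfold fnd_pair_of_ind_in_ordered_arr fnd_pair_of_ind_in_ordered_arr_alt
  set v1 := (PySem.List.pyGet? val 1).getD 0 with hv1
  set v0 := (PySem.List.pyGet? val 0).getD 0 with hv0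
  have hcast : (arr.length : Int) - 1 = ((arr.length - 1 : Nat) : Int) := by omega
  have h1 : pvScanA arr v1 ((arr.length : Int) - 1) = pvLastGt arr v1 (arr.length - 1) := by
    rw [hcast]
    exact pv_scanA_eq_lastGt arr v1 (arr.length - 1) (by omega)
  have hle := pv_lastGt_le arr v1 (arr.length - 1)
  have hge := pv_lastGt_nonneg arr v1 (arr.length - 1)
  have hcast2 : pvLastGt arr v1 (arr.length - 1)
      = (((pvLastGt arr v1 (arr.length - 1)).toNat : Nat) : Int) := by omega
  have h0 : pvScanA arr v0 (pvScanA arr v1 ((arr.length : Int) - 1))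
      = pvLastGt arr v0 (pvLastGt arr v1 (arr.length - 1)).toNat := by
    rw [h1, hcast2]
    exact pv_scanA_eq_lastGt arr v0 _ (by omega)
  have hcast3 : (arr.length : Int) = (((arr.length - 1) + 1 : Nat) : Int) := by omega
  have hfold := pv_fold_invariant arr v0 v1 (arr.length - 1) (by omega)
  simp only [List.reverse_cons, List.reverse_nil, List.nil_append, List.reverse_append]
  rw [h0, h1, hcast3, hfold]
  rfl

theorem fnd_pair_of_ind_in_ordered_arr_changed : Claim_changed_fnd_pair_of_ind_in_ordered_arr := by
  unfold Claim_changed_fnd_pair_of_ind_in_ordered_arr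
  exact ⟨by decide, by decide, by decide, pv_fndA_nil [0, 0], pv_fndB_nil [0, 0], by decide⟩

theorem fnd_pair_of_ind_in_ordered_arr_tight : Claim_exact_fnd_pair_of_ind_in_ordered_arr := by
  intro arr val _ _ hd
  unfold D_fnd_pair_of_ind_in_ordered_arr at hd
  subst hd
  rw [pv_fndA_nil val, pv_fndB_nil val]
  decide
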